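-- pv_equiv track=rewrite | github.com/bsljth/bookbot | main.py | num_chars
-- ===== SOURCE A (Python) =====
-- def num_chars(words_arr, alph_dict):
--   alphs = "abcdefghijklmnopqrstuvwxyz"
--   for word in words_arr:
--     word = word.lower()
--     for char in word:
--       if char in alphs:
--         alph_dict[char] += 1
--   return alph_dict
-- ===== SOURCE B (Python) =====
-- def num_chars(words_arr, alph_dict):
--   text = "".join(words_arr).lower()
--   for ch in set(text):
--     if ch in "abcdefghijklmnopqrstuvwxyz":
--       alph_dict[ch] += text.count(ch)
--   return alph_dict
-- ===== Notes on version B (the rewrite author's own statement) =====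
-- stated objective: alternative
-- what changed: B joins all words into one lowered text and then loops over the DISTINCT characters of that text (set(text)), adding text.count(ch) once per distinct letter, instead of A's per-word per-character scan that increments the dict once per occurrence.
import Mathlib
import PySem

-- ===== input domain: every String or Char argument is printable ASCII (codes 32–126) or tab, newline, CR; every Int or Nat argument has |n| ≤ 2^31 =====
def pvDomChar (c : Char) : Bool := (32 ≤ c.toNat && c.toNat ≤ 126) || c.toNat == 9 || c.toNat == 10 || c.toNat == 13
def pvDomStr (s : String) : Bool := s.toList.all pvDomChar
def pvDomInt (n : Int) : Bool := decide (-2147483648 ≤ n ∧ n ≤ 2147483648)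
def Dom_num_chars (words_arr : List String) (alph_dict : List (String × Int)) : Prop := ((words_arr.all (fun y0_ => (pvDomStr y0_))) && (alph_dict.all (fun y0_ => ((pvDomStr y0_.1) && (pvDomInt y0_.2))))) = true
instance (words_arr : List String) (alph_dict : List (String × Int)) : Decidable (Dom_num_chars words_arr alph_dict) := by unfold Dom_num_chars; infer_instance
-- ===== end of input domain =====

-- B joins all words into one lowered text and then loops over the DISTINCT characters of that
-- text, adding text.count(ch) once per distinct letter, instead of A's per-word per-character scan
-- that increments the dict once per occurrence.  Both Pythons mutate and return the caller's
-- alph_dict dict; B performs the same mutation (same final values).  B's `for ch in set(text)`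
-- visits the distinct characters in an order Python leaves unspecified; the result does not depend
-- on that order (the updates commute), and the port uses first-occurrence order.

-- ===== PORT A =====
-- shared helper: `alph_dict[k] += n` (Python raises KeyError when k is missing; Pre_ excludes
-- that, so the `none` branch is never reached on admitted inputs)
def pyAddAt (d : PySem.Dict String Int) (k : String) (n : Int) : PySem.Dict String Int :=
  match d.get? k with
  | some v => d.insert k (v + n)
  | none => d

def num_chars (words_arr : List String) (alph_dict : List (String × Int)) : List (String × Int) :=
  (words_arr.foldl (fun d word =>
      (PySem.Str.lower word).toList.foldl (fun d char =>
        if PySem.Chars.isIn [char] "abcdefghijklmnopqrstuvwxyz".toList then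
          pyAddAt d char.toString 1
        else d) d)
    (PySem.Dict.mk alph_dict)).items

-- ===== PORT B =====
def num_chars_alt (words_arr : List String) (alph_dict : List (String × Int)) : List (String × Int) :=
  let text : String := PySem.Str.lower (PySem.Str.join "" words_arr)
  ((PySem.Set.ofList text.toList).foldl (fun d ch =>
      if PySem.Chars.isIn [ch] "abcdefghijklmnopqrstuvwxyz".toList then
        pyAddAt d ch.toString ((PySem.Chars.count text.toList [ch] : Nat) : Int)
      else d)
    (PySem.Dict.mk alph_dict)).items

-- ===== PRECONDITION & SPEC =====
-- First conjunct excludes association lists with duplicate keys, which cannot arise from a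
-- Python dict (a pure modelling corner of the dict-as-list convention); second conjunct
-- excludes exactly the inputs on which the Python A raises KeyError: some lowercase letter
-- occurring in the words has no key in alph_dict.
def Pre_num_chars (words_arr : List String) (alph_dict : List (String × Int)) : Prop :=
  (alph_dict.map Prod.fst).Nodup ∧
  (words_arr.all (fun w => (PySem.Str.lower w).toList.all (fun c =>
     !(PySem.Chars.isIn [c] "abcdefghijklmnopqrstuvwxyz".toList)
       || alph_dict.any (fun p => p.1 == c.toString)))) = true
instance (words_arr : List String) (alph_dict : List (String × Int)) : Decidable (Pre_num_chars words_arr alph_dict) := by unfold Pre_num_chars; infer_instance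

def pvWitness_num_chars : List String × (List (String × Int)) := (["Hi!", "hi"], [("h", 0), ("i", 2), ("z", 5)])

def Spec_num_chars (words_arr : List String) (alph_dict : List (String × Int)) (out : List (String × Int)) : Prop := out = num_chars_alt words_arr alph_dict
instance (words_arr : List String) (alph_dict : List (String × Int)) (out : List (String × Int)) : Decidable (Spec_num_chars words_arr alph_dict out) := by unfold Spec_num_chars; infer_instance

-- ===== CLAIM (what is proved, stated in full; the proofs are below) =====
def Claim_equal_num_chars : Prop := ∀ (words_arr : List String) (alph_dict : List (String × Int)), Dom_num_chars words_arr alph_dict → Pre_num_chars words_arr alph_dict → Spec_num_chars words_arr alph_dict (num_chars words_arr alph_dict)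

-- ===== LEMMAS AND PROOFS =====

-- `alph_dict[k] += n` rewrites the items list pointwise (needs unique keys)
theorem pv_items_pyAddAt (d : PySem.Dict String Int) (hnd : d.keys.Nodup) (k : String) (n : Int) :
    (pyAddAt d k n).items = d.items.map (fun p => if p.1 = k then (p.1, p.2 + n) else p) := by
  cases h : d.get? k with
  | none =>
    have hk : ∀ p ∈ d.items, p.1 ≠ k := by
      rintro ⟨pk, pv⟩ hp hpk
      have : d.get? pk = some pv := PySem.Dict.get?_of_mem_items d hp hnd
      have hpk' : pk = k := hpk
      rw [hpk', h] at this; simp at this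
    simp only [pyAddAt, h]
    rw [List.map_congr_left
      (fun p hp => by simp [hk p hp] : ∀ p ∈ d.items, (if p.1 = k then (p.1, p.2 + n) else p) = id p),
      List.map_id]
  | some v =>
    have hc : d.contains k = true := by rw [PySem.Dict.contains_eq_isSome_get?, h]; rfl
    simp only [pyAddAt, h]
    rw [PySem.Dict.items_insert_of_contains _ _ hc]
    apply List.map_congr_left
    rintro ⟨pk, pv⟩ hp
    by_cases hpk : pk = k
    · have : d.get? pk = some pv := PySem.Dict.get?_of_mem_items d hp hnd
      rw [hpk, h] at this
      have hv : v = pv := Option.some.inj this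
      simp [hpk, hv]
    · simp [hpk]

theorem pv_keys_pyAddAt (d : PySem.Dict String Int) (k : String) (n : Int) :
    (pyAddAt d k n).keys = d.keys := by
  cases h : d.get? k with
  | none => simp [pyAddAt, h]
  | some v =>
    have hc : d.contains k = true := by rw [PySem.Dict.contains_eq_isSome_get?, h]; rfl
    simp only [pyAddAt, h]
    exact PySem.Dict.keys_insert_of_contains _ _ hc

-- a guarded update loop rewrites the items pointwise: each item gains the f-total of the loop
-- elements that pass the guard and name its key
theorem pv_fold_items (cond : Char → Bool) (f : Char → Int) :
    ∀ (L : List Char) (d : PySem.Dict String Int), d.keys.Nodup →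
    (L.foldl (fun d c => if cond c then pyAddAt d c.toString (f c) else d) d).items
      = d.items.map (fun p => (p.1, p.2 +
          ((L.filter (fun c => cond c && (c.toString == p.1))).map f).sum)) := by
  intro L
  induction L with
  | nil =>
    intro d _
    simp
  | cons c t ih =>
    intro d hnd
    rw [List.foldl_cons]
    by_cases hc : cond c = true
    · rw [if_pos hc, ih _ (by rw [pv_keys_pyAddAt]; exact hnd),
          pv_items_pyAddAt d hnd, List.map_map]
      apply List.map_congr_left
      intro p _
      by_cases hpk : p.1 = c.toString
      · have hbeq : (c.toString == p.1) = true := beq_iff_eq.mpr hpk.symm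
        simp only [Function.comp, if_pos hpk, List.filter_cons, hc, hbeq, Bool.and_self, if_true,
          List.map_cons, List.sum_cons]
        rw [Prod.mk.injEq]
        exact ⟨rfl, by ring⟩
      · have hbeq : (c.toString == p.1) = false := beq_eq_false_iff_ne.mpr (fun hh => hpk hh.symm)
        simp only [Function.comp, if_neg hpk, List.filter_cons, hbeq, Bool.and_false,
          Bool.false_eq_true, if_false]
    · rw [if_neg hc, ih _ hnd]
      apply List.map_congr_left
      intro p _
      have : (cond c && (c.toString == p.1)) = false := by
        rw [Bool.and_eq_false_iff]; exact Or.inl (Bool.eq_false_iff.mpr hc)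
      simp only [List.filter_cons, this, Bool.false_eq_true, if_false]

-- Python str.count with a one-character needle is character counting
theorem pv_count_go (c : Char) : ∀ (fuel : Nat) (cs : List Char) (acc : Nat), cs.length ≤ fuel →
    PySem.Chars.count.go [c] fuel cs acc = acc + cs.count c := by
  intro fuel
  induction fuel with
  | zero =>
    intro cs acc h
    have : cs = [] := List.eq_nil_of_length_eq_zero (Nat.le_zero.mp h)
    subst this
    simp [PySem.Chars.count.go]
  | succ m ih =>
    intro cs acc h
    cases cs with
    | nil => simp [PySem.Chars.count.go]
    | cons x t =>
      rw [PySem.Chars.count.go]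
      by_cases hx : c = x
      · subst hx
        have : [c].isPrefixOf (c :: t) = true := by simp [List.isPrefixOf]
        simp only [this, List.length_cons, List.length_nil, List.drop_succ_cons, List.drop_zero, if_true]
        rw [ih t (acc + 1) (by simpa using h), List.count_cons]
        simp only [BEq.rfl, if_true]
        omega
      · have : [c].isPrefixOf (x :: t) = false := by
          simp only [List.isPrefixOf, Bool.and_eq_false_iff]
          left
          exact beq_eq_false_iff_ne.mpr hx
        simp only [this, Bool.false_eq_true, if_false]
        rw [ih t acc (by simpa using h), List.count_cons]
        have : (x == c) = false := beq_eq_false_iff_ne.mpr (fun hh => hx hh.symm)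
        simp [this]

theorem pv_count_singleton (cs : List Char) (c : Char) :
    PySem.Chars.count cs [c] = cs.count c := by
  rw [PySem.Chars.count]
  simp only [List.isEmpty_cons, Bool.false_eq_true, if_false]
  simpa using pv_count_go c cs.length cs 0 le_rfl

-- the joined-and-lowered text is the concatenation of the lowered words
theorem pv_text (words_arr : List String) :
    (PySem.Str.lower (PySem.Str.join "" words_arr)).toList
      = words_arr.flatMap (fun w => PySem.Chars.lower w.toList) := by
  have hj : (PySem.Str.join "" words_arr).toList
      = PySem.Chars.join [] (words_arr.map String.toList) := by simp [pysem]
  rw [PySem.Str.toList_lower, hj]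
  have hflat : ∀ xss : List (List Char), (List.intersperse ([] : List Char) xss).flatten = xss.flatten := by
    intro xss
    induction xss with
    | nil => rfl
    | cons x t ih => cases t <;> simp_all [List.intersperse]
  rw [PySem.Chars.join, List.intercalate, hflat]
  simp only [PySem.Chars.lower, List.map_flatten, List.map_map]
  rw [List.flatMap_def]
  rfl

-- summing per-distinct-character counts equals counting all matching occurrences, when the
-- predicate can hold of at most one character
theorem pv_sum_counts (text : List Char) (q : Char → Bool)
    (huniq : ∀ c c', q c = true → q c' = true → c = c') :
    (((PySem.Set.ofList text).filter q).map (fun c => ((text.count c : Nat) : Int))).sum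
      = ((text.countP q : Nat) : Int) := by
  have hndF : ((PySem.Set.ofList text).filter q).Nodup :=
    (PySem.Set.nodup_ofList text).filter q
  cases hF : (PySem.Set.ofList text).filter q with
  | nil =>
    have h0 : text.countP q = 0 := by
      apply List.countP_eq_zero.mpr
      intro c hc hqc
      have : c ∈ (PySem.Set.ofList text).filter q :=
        List.mem_filter.mpr ⟨(PySem.Set.mem_ofList text c).mpr hc, hqc⟩
      rw [hF] at this
      exact absurd this (List.not_mem_nil)
    simp [h0]
  | cons c rest =>
    have hcF : c ∈ (PySem.Set.ofList text).filter q := by rw [hF]; exact List.mem_cons_self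
    have hqc : q c = true := (List.mem_filter.mp hcF).2
    have hcm : c ∈ text := (PySem.Set.mem_ofList text c).mp (List.mem_filter.mp hcF).1
    have hrest : rest = [] := by
      cases hr : rest with
      | nil => rfl
      | cons x r2 =>
        exfalso
        have hxF : x ∈ (PySem.Set.ofList text).filter q := by
          rw [hF, hr]; exact List.mem_cons_of_mem _ List.mem_cons_self
        have hx : x = c := huniq x c (List.mem_filter.mp hxF).2 hqc
        rw [hF, hr] at hndF
        exact (List.nodup_cons.mp hndF).1 (hx ▸ List.mem_cons_self)
    subst hrest
    have hcnt : text.countP q = text.count c := by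
      rw [List.count]
      apply List.countP_congr
      intro c' _
      constructor
      · intro h
        exact beq_iff_eq.mpr (huniq c' c h hqc)
      · intro h
        rw [beq_iff_eq.mp h]
        exact hqc
    simp [hcnt]

-- ===== VERDICT (by name: the statement is the Claim_ definition above) =====
theorem num_chars_spec : Claim_equal_num_chars := by
  intro words_arr alph_dict _ hpre
  unfold Spec_num_chars num_chars num_chars_alt
  have hnd : (PySem.Dict.mk alph_dict).keys.Nodup := hpre.1
  simp only [PySem.Str.toList_lower]
  rw [← List.foldl_flatMap]
  have hA := pv_fold_items (fun c => PySem.Chars.isIn [c] "abcdefghijklmnopqrstuvwxyz".toList)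
    (fun _ => (1 : Int)) (words_arr.flatMap (fun w => PySem.Chars.lower w.toList))
    (PySem.Dict.mk alph_dict) hnd
  simp only at hA
  rw [hA]
  have htext : PySem.Chars.lower (PySem.Str.join "" words_arr).toList
      = words_arr.flatMap (fun w => PySem.Chars.lower w.toList) := by
    rw [← PySem.Str.toList_lower]; exact pv_text words_arr
  rw [htext]
  have hB := pv_fold_items (fun c => PySem.Chars.isIn [c] "abcdefghijklmnopqrstuvwxyz".toList)
    (fun ch => ((PySem.Chars.count (words_arr.flatMap (fun w => PySem.Chars.lower w.toList)) [ch] : Nat) : Int))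
    (PySem.Set.ofList (words_arr.flatMap (fun w => PySem.Chars.lower w.toList)))
    (PySem.Dict.mk alph_dict) hnd
  simp only at hB
  rw [hB]
  apply List.map_congr_left
  intro p _
  have huniq : ∀ c c' : Char,
      (PySem.Chars.isIn [c] "abcdefghijklmnopqrstuvwxyz".toList && (c.toString == p.1)) = true →
      (PySem.Chars.isIn [c'] "abcdefghijklmnopqrstuvwxyz".toList && (c'.toString == p.1)) = true →
      c = c' := by
    intro c c' h h'
    have h1 : c.toString = p.1 := beq_iff_eq.mp (Bool.and_eq_true_iff.mp h).2
    have h2 : c'.toString = p.1 := beq_iff_eq.mp (Bool.and_eq_true_iff.mp h').2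
    have : c.toString.toList = c'.toString.toList := by rw [h1, h2]
    simpa [Char.toString_eq_singleton] using this
  have hsum := pv_sum_counts (words_arr.flatMap (fun w => PySem.Chars.lower w.toList))
    (fun c => PySem.Chars.isIn [c] "abcdefghijklmnopqrstuvwxyz".toList && (c.toString == p.1)) huniq
  have hmap : (((PySem.Set.ofList (words_arr.flatMap (fun w => PySem.Chars.lower w.toList))).filter
        (fun c => PySem.Chars.isIn [c] "abcdefghijklmnopqrstuvwxyz".toList && (c.toString == p.1))).map
        (fun ch => ((PySem.Chars.count (words_arr.flatMap (fun w => PySem.Chars.lower w.toList)) [ch] : Nat) : Int)))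
      = (((PySem.Set.ofList (words_arr.flatMap (fun w => PySem.Chars.lower w.toList))).filter
        (fun c => PySem.Chars.isIn [c] "abcdefghijklmnopqrstuvwxyz".toList && (c.toString == p.1))).map
        (fun c => (((words_arr.flatMap (fun w => PySem.Chars.lower w.toList)).count c : Nat) : Int))) := by
    apply List.map_congr_left
    intro c _
    rw [pv_count_singleton]
  rw [hmap, hsum]
  have hone : (((words_arr.flatMap (fun w => PySem.Chars.lower w.toList)).filter
        (fun c => PySem.Chars.isIn [c] "abcdefghijklmnopqrstuvwxyz".toList && (c.toString == p.1))).map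
        (fun _ => (1 : Int))).sum
      = (((words_arr.flatMap (fun w => PySem.Chars.lower w.toList)).countP
        (fun c => PySem.Chars.isIn [c] "abcdefghijklmnopqrstuvwxyz".toList && (c.toString == p.1)) : Nat) : Int) := by
    rw [List.countP_eq_length_filter]
    generalize ((words_arr.flatMap (fun w => PySem.Chars.lower w.toList)).filter
      (fun c => PySem.Chars.isIn [c] "abcdefghijklmnopqrstuvwxyz".toList && (c.toString == p.1))) = l
    induction l with
    | nil => simp
    | cons x t ih =>
      simp only [List.map_cons, List.sum_cons, List.length_cons, ih]
      push_cast
      ring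
  rw [hone]
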